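-- pv_equiv track=rewrite | github.com/sirajudinBadi/CodingNinjas-Data-Science-ML-Solutions | Tuples, Dictionary and Sets/Unique triangles.py | unique_triangles
-- ===== SOURCE A (Python) =====
-- def unique_triangles(l):
--     areas_of_all_triangle = [] # To store areas of all triangles.
--
--     #Looping over all three sizes and storing area of triangle
--     for i in range(len(l)):
--         area_of_triangle = 1
--         for j in range(3): #Triangle always have three sides
--             area_of_triangle *= l[i][j]
--         areas_of_all_triangle.append(area_of_triangle)
--
--
--     d = {} # To store frequency of sizes
--
--     #To count the frequency of all triangle areas
--     for sum in areas_of_all_triangle: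
--         d[sum] = d.get(sum, 0) + 1
--
--     #To count the unique triangles.
--     count = 0
--     for value in d.values():
--         if value == 1:
--             count += 1
--     return count
-- ===== SOURCE B (Python) =====
-- def unique_triangles(l):
--     # Sort the side-products, then count singleton runs in one adjacent scan
--     # (no frequency dictionary).
--     prods = sorted(t[0] * t[1] * t[2] for t in l)
--     count = 0
--     while prods:
--         run = 1
--         while run < len(prods) and prods[run] == prods[0]:
--             run += 1
--         if run == 1:
--             count += 1
--         prods = prods[run:]
--     return count
-- ===== Notes on version B (the rewrite author's own statement) =====
-- stated objective: alternative
-- what changed: B sorts the list of side-products and counts singleton runs in one adjacent scan over the sorted list, instead of building a frequency dictionary and counting values equal to 1.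
import Mathlib
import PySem

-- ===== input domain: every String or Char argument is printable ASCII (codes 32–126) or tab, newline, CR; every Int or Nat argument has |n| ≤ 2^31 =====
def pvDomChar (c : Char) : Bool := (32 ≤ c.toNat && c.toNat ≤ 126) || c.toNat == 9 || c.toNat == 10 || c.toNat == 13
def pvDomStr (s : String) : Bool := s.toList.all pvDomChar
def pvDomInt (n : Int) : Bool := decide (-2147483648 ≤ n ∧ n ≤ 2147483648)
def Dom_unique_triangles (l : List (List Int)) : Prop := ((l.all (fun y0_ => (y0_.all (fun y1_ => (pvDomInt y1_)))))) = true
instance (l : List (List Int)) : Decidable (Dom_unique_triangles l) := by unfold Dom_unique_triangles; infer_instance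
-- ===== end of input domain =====

-- B sorts the side-products and counts singleton runs in one adjacent scan instead of
-- building a frequency dictionary (objective: alternative algorithm, similar cost).

-- ===== PORT A =====
def unique_triangles (l : List (List Int)) : Int :=
  let areas : List Int := (PySem.List.pyRange 0 (l.length : Int) 1).foldl
    (fun acc i => acc ++ [(PySem.List.pyRange 0 3 1).foldl
        (fun a j => a * PySem.List.pyGetD (PySem.List.pyGetD l i []) j 0) 1]) []
  let d : PySem.Dict Int Int :=
    areas.foldl (fun d s => d.insert s (d.getD s 0 + 1)) PySem.Dict.empty
  d.values.foldl (fun c v => if v == 1 then c + 1 else c) 0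

-- ===== PORT B =====
-- inner while: 'run = 1; while run < len(prods) and prods[run] == prods[0]: run += 1'
def runLen (prods : List Int) (run : Nat) : Nat :=
  if h : run < prods.length ∧
      PySem.List.pyGetD prods (run : Int) 0 == PySem.List.pyGetD prods 0 0 then
    runLen prods (run + 1)
  else run
termination_by prods.length - run
decreasing_by omega

theorem runLen_ge (prods : List Int) (run : Nat) : run ≤ runLen prods run := by
  unfold runLen
  split
  · exact le_trans (Nat.le_succ run) (runLen_ge prods (run + 1))
  · exact le_refl run
termination_by prods.length - run
decreasing_by rename_i h; omega

-- outer while: pop one run per iteration; 'prods = prods[run:]' with 0 ≤ run is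
-- List.drop run (PySem.List.slice_from_natCast)
def countRuns : List Int → Int → Int
  | [], count => count
  | x :: t, count =>
    let run := runLen (x :: t) 1
    countRuns ((x :: t).drop run) (if run == 1 then count + 1 else count)
termination_by prods _ => prods.length
decreasing_by
  have := runLen_ge (x :: t) 1
  simp [List.length_drop]
  omega

def unique_triangles_alt (l : List (List Int)) : Int :=
  let prods := PySem.List.sorted
    (l.map (fun t => PySem.List.pyGetD t 0 0 * PySem.List.pyGetD t 1 0 *
                     PySem.List.pyGetD t 2 0))
    (fun x => x) false
  countRuns prods 0

-- ===== PRECONDITION & SPEC =====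
-- Pre_ excludes exactly the inputs where Python A raises IndexError: a row with
-- fewer than 3 entries (A reads l[i][0..2]).
def Pre_unique_triangles (l : List (List Int)) : Prop := ∀ r ∈ l, 3 ≤ r.length
instance (l : List (List Int)) : Decidable (Pre_unique_triangles l) := by
  unfold Pre_unique_triangles; infer_instance
def pvWitness_unique_triangles : List (List Int) := [[1,2,3],[2,3,4],[1,2,3]]

def Spec_unique_triangles (l : List (List Int)) (out : Int) : Prop := out = unique_triangles_alt l
instance (l : List (List Int)) (out : Int) : Decidable (Spec_unique_triangles l out) := by unfold Spec_unique_triangles; infer_instance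

-- ===== CLAIM (what is proved, stated in full; the proofs are below) =====
def Claim_equal_unique_triangles : Prop := ∀ (l : List (List Int)), Dom_unique_triangles l → Pre_unique_triangles l → Spec_unique_triangles l (unique_triangles l)

-- ===== LEMMAS AND PROOFS =====

-- the common value: number of distinct products occurring exactly once
def uniqCard (xs : List Int) : Nat :=
  (xs.toFinset.filter (fun k => xs.count k = 1)).card

theorem uniqCard_perm {xs ys : List Int} (h : xs.Perm ys) : uniqCard xs = uniqCard ys := by
  unfold uniqCard
  rw [List.toFinset_eq_of_perm _ _ h]
  congr 1
  apply Finset.filter_congr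
  intro k _
  simp [h.count_eq]

theorem countP_eq_uniqCard (xs d : List Int) (hnd : d.Nodup)
    (hmem : ∀ k, k ∈ d ↔ k ∈ xs) :
    d.countP (fun k => (xs.count k : Int) == 1) = uniqCard xs := by
  unfold uniqCard
  rw [List.countP_eq_length_filter, ← List.toFinset_card_of_nodup (hnd.filter _)]
  congr 1
  ext k
  by_cases h : xs.count k = 1 <;> simp [hmem k, h]

theorem areas_eq_map (l : List (List Int)) :
    (PySem.List.pyRange 0 (l.length : Int) 1).foldl
      (fun acc i => acc ++ [(PySem.List.pyRange 0 3 1).foldl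
        (fun a j => a * PySem.List.pyGetD (PySem.List.pyGetD l i []) j 0) 1]) []
    = l.map (fun t => PySem.List.pyGetD t 0 0 * PySem.List.pyGetD t 1 0 *
        PySem.List.pyGetD t 2 0) := by
  have h3 : PySem.List.pyRange 0 3 1 = [0,1,2] := by decide
  rw [h3]
  simp only [List.foldl_cons, List.foldl_nil]
  rw [PySem.List.foldl_append_singleton_eq_map]
  conv_rhs => rw [← PySem.List.map_pyGetD_pyRange_zero' l ([] : List Int), List.map_map]
  simp only [List.nil_append]
  apply List.map_congr_left
  intro i hi
  obtain ⟨h0, hlt⟩ := PySem.List.mem_pyRange_one.mp hi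
  simp [Function.comp, one_mul]

theorem count_loop_eq (areas : List Int) :
    (((areas.foldl (fun d s => d.insert s (d.getD s 0 + 1)) PySem.Dict.empty :
        PySem.Dict Int Int)).values.foldl
      (fun c v => if v == 1 then c + 1 else c) (0:Int))
    = ((PySem.List.dedup areas).countP (fun k => (areas.count k : Int) == 1) : Int) := by
  rw [PySem.Dict.foldl_insert_getD_add_one_eq_counter areas]
  rw [PySem.List.foldl_if_add_one]
  have hv : (PySem.Dict.counter areas).values
      = (PySem.Set.ofList areas).map (fun k => (areas.count k : Int)) := by
    show ((PySem.Dict.counter areas).items.map (·.2))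
        = (PySem.Set.ofList areas).map (fun k => (areas.count k : Int))
    rw [PySem.Dict.items_counter, List.map_map]
    rfl
  rw [hv, List.countP_map, zero_add]
  norm_cast

theorem A_eq_uniqCard (l : List (List Int)) :
    unique_triangles l =
      (uniqCard (l.map (fun t => PySem.List.pyGetD t 0 0 * PySem.List.pyGetD t 1 0 *
        PySem.List.pyGetD t 2 0)) : Int) := by
  unfold unique_triangles
  rw [areas_eq_map l, count_loop_eq]
  rw [countP_eq_uniqCard _ _ (PySem.List.nodup_dedup _) (fun k => PySem.List.mem_dedup _ _)]

theorem runLen_char (x : Int) (t : List Int) (run : Nat) :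
    runLen (x :: t) (run + 1) =
      (run + 1) + ((t.drop run).takeWhile (fun y => y == x)).length := by
  rw [runLen]
  by_cases hlt : run < t.length
  · have hdrop : t.drop run = t[run] :: t.drop (run + 1) := List.drop_eq_getElem_cons hlt
    have hget : PySem.List.pyGetD (x :: t) ((run + 1 : Nat) : Int) 0 = t[run] := by
      rw [PySem.List.pyGetD_natCast, List.getD_cons_succ, List.getD_eq_getElem _ _ hlt]
    by_cases heq : t[run] = x
    · rw [dif_pos ⟨by simp; omega, by rw [hget]; simp [heq, PySem.List.pyGetD_zero_cons]⟩]
      rw [runLen_char x t (run + 1)]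
      rw [hdrop, List.takeWhile_cons]
      simp [heq]
      omega
    · rw [dif_neg, hdrop, List.takeWhile_cons]
      · simp [heq]
      · rw [hget]
        simp [heq, PySem.List.pyGetD_zero_cons]
  · rw [dif_neg, List.drop_eq_nil_of_le (by omega)]
    · simp
    · simp; omega
termination_by t.length - run
decreasing_by omega

theorem uniqCard_cons_run (x : Int) (t : List Int) (hs : (x :: t).Pairwise (· ≤ ·)) :
    uniqCard (x :: t) =
      (if (t.takeWhile (fun y => y == x)).length = 0 then 1 else 0)
        + uniqCard (t.dropWhile (fun y => y == x)) := by
  set a := t.takeWhile (fun y => y == x) with ha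
  set r := t.dropWhile (fun y => y == x) with hr
  have ht : a ++ r = t := List.takeWhile_append_dropWhile
  have haall : ∀ y ∈ a, y = x := by
    intro y hy
    have := List.mem_takeWhile_imp hy
    simpa using this
  have hxt : ∀ y ∈ t, x ≤ y := (List.pairwise_cons.mp hs).1
  have hrp : r.Pairwise (· ≤ ·) :=
    List.Pairwise.sublist (List.dropWhile_sublist _) (List.pairwise_cons.mp hs).2
  have hxr : x ∉ r := by
    cases hre : r with
    | nil => simp
    | cons y r' =>
      have hhead := List.head?_dropWhile_not (fun y => y == x) t
      rw [← hr, hre] at hhead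
      simp at hhead
      intro hxin
      rcases List.mem_cons.mp hxin with h | h
      · exact hhead h.symm
      · have hyr : y ≤ x := ((List.pairwise_cons.mp (hre ▸ hrp)).1) x h
        have hxy : x ≤ y := hxt y (by rw [← ht, hre]; simp)
        exact hhead (le_antisymm hyr hxy)
  have hcountx : (x :: t).count x = 1 + a.length := by
    rw [List.count_cons_self, ← ht, List.count_append]
    have h1 : a.count x = a.length := List.count_eq_length.mpr (fun b hb => (haall b hb).symm)
    have h2 : r.count x = 0 := List.count_eq_zero.mpr hxr
    omega
  have hcountr : ∀ z ∈ r, (x :: t).count z = r.count z := by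
    intro z hz
    have hzx : z ≠ x := fun h => hxr (h ▸ hz)
    rw [List.count_cons_of_ne (Ne.symm hzx), ← ht, List.count_append]
    have h1 : a.count z = 0 := List.count_eq_zero.mpr (fun hza => hzx (haall z hza))
    omega
  unfold uniqCard
  have htf : (x :: t).toFinset = insert x r.toFinset := by
    ext z
    simp [← ht]
    constructor
    · rintro (h | h | h)
      · left; exact h
      · left; exact haall z h
      · right; exact h
    · rintro (h | h)
      · left; exact h
      · right; right; exact h
  rw [htf, Finset.filter_insert]
  have hxnotin : x ∉ r.toFinset.filter (fun k => (x :: t).count k = 1) := by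
    simp [hxr]
  have hfc : r.toFinset.filter (fun k => (x :: t).count k = 1)
      = r.toFinset.filter (fun k => r.count k = 1) := by
    apply Finset.filter_congr
    intro z hz
    rw [hcountr z (List.mem_toFinset.mp hz)]
  by_cases hk : a.length = 0
  · rw [if_pos (by rw [hcountx]; omega), if_pos hk,
      Finset.card_insert_of_notMem hxnotin, hfc]
    omega
  · rw [if_neg (by rw [hcountx]; omega), if_neg hk, hfc]
    omega

theorem drop_takeWhile_length (p : Int → Bool) (t : List Int) :
    t.drop (t.takeWhile p).length = t.dropWhile p := by
  induction t with
  | nil => simp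
  | cons y ys ih => by_cases h : p y <;> simp [h, ih]

theorem countRuns_sorted (s : List Int) (hs : s.Pairwise (· ≤ ·)) (c : Int) :
    countRuns s c = c + (uniqCard s : Int) := by
  match s with
  | [] => simp [countRuns, uniqCard]
  | x :: t =>
    have ht : t.takeWhile (fun y => y == x) ++ t.dropWhile (fun y => y == x) = t :=
      List.takeWhile_append_dropWhile
    have hrun : runLen (x :: t) 1 = 1 + (t.takeWhile (fun y => y == x)).length := by
      have := runLen_char x t 0
      simpa using this
    have hdrop : (x :: t).drop (runLen (x :: t) 1) = t.dropWhile (fun y => y == x) := by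
      rw [hrun, Nat.add_comm, List.drop_succ_cons, drop_takeWhile_length]
    have hlen : (t.dropWhile (fun y => y == x)).length ≤ t.length :=
      List.Sublist.length_le (List.dropWhile_sublist _)
    have hrp : (t.dropWhile (fun y => y == x)).Pairwise (· ≤ ·) :=
      List.Pairwise.sublist (List.dropWhile_sublist _) (List.pairwise_cons.mp hs).2
    rw [countRuns]
    simp only [hdrop]
    rw [countRuns_sorted (t.dropWhile (fun y => y == x)) hrp _]
    rw [uniqCard_cons_run x t hs]
    by_cases hk : (t.takeWhile (fun y => y == x)).length = 0 <;>
      simp [hrun, hk] <;> omega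
termination_by s.length
decreasing_by simp; omega

theorem B_eq_uniqCard (l : List (List Int)) :
    unique_triangles_alt l =
      (uniqCard (l.map (fun t => PySem.List.pyGetD t 0 0 * PySem.List.pyGetD t 1 0 *
        PySem.List.pyGetD t 2 0)) : Int) := by
  unfold unique_triangles_alt
  set prods := l.map (fun t => PySem.List.pyGetD t 0 0 * PySem.List.pyGetD t 1 0 *
    PySem.List.pyGetD t 2 0) with hp
  have hsort : (PySem.List.sorted prods (fun x => x) false).Pairwise (· ≤ ·) :=
    PySem.List.sorted_pairwise prods (fun x => x)
  rw [countRuns_sorted _ hsort 0, zero_add]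
  rw [uniqCard_perm (PySem.List.sorted_perm prods (fun x => x) false)]

-- ===== VERDICT (by name: the statement is the Claim_ definition above) =====
theorem unique_triangles_spec : Claim_equal_unique_triangles := by
  intro l _ _
  unfold Spec_unique_triangles
  rw [A_eq_uniqCard, B_eq_uniqCard]
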